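-- pv_equiv track=rewrite | github.com/martiFabia/On-demand-visualization-of-HSE-data | insight_extraction/extraction/sql_execute.py | parse_llm_sql_response
-- ===== SOURCE A (Python) =====
-- from typing import Dict, List, Any, Tuple
--
-- def parse_llm_sql_response(response: str) -> Dict[str, str]:
--     """
--     Parse the SQL string returned by the LLM into separate queries.
--
--     Expected format (as enforced in your prompt):
--
--         -- MAIN QUERY
--         SELECT ...
--
--         -- EXTRA INSIGHT QUERY 1
--         SELECT ...
--
--         -- EXTRA INSIGHT QUERY 2
--         SELECT ...
--
--     Returns a dict mapping a key (e.g. "main_query", "extra_insight_query_1")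
--     to the corresponding SQL string.
--     """
--     lines = response.splitlines()
--
--     queries: Dict[str, List[str]] = {}
--     current_key: str | None = None
--
--     def normalize_label(label_line: str) -> str:
--         # strip leading '--' and spaces
--         label = label_line.lstrip("- ").strip().lower()
--         # e.g. "main query" -> "main_query"
--         label = label.replace(" ", "_")
--         # ensure some reasonable key
--         return label
--
--     for line in lines:
--         stripped = line.strip()
--
--         # Detect label lines starting with "--"
--         if stripped.startswith("--"):
--             key = normalize_label(stripped)
--             current_key = key
--             if current_key not in queries:
--                 queries[current_key] = []
--         else:
--             # Normal SQL line, append to current query (if any)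
--             if current_key is None:
--                 # If the model didn't include labels at all, treat everything as main query
--                 current_key = "main_query"
--                 if current_key not in queries:
--                     queries[current_key] = []
--             queries[current_key].append(line)
--
--     # Join lines into SQL strings and strip empty ones
--     sql_queries: Dict[str, str] = {}
--     for key, sql_lines in queries.items():
--         sql_text = "\n".join(sql_lines).strip()
--         if sql_text:
--             sql_queries[key] = sql_text
--
--     return sql_queries
-- ===== SOURCE B (Python) =====
-- def parse_llm_sql_response(response: str):
--     """Segment-then-merge reimplementation: split the response into labeled
--     segments first, then fold the segments into an ordered dict."""
--     lines = response.splitlines()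
--
--     def normalize_label(label_line: str) -> str:
--         return label_line.lstrip("- ").strip().lower().replace(" ", "_")
--
--     def split_at_label(ls):
--         # (leading non-label lines, remainder starting at the first label line)
--         for i, l in enumerate(ls):
--             if l.strip().startswith("--"):
--                 return ls[:i], ls[i:]
--         return ls, []
--
--     def segments(ls):
--         # list of (normalized_key, block_of_original_lines), in text order
--         if not ls:
--             return []
--         if ls[0].strip().startswith("--"):
--             block, rest = split_at_label(ls[1:])
--             return [(normalize_label(ls[0].strip()), block)] + segments(rest)
--         block, rest = split_at_label(ls)
--         return [("main_query", block)] + segments(rest)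
--
--     merged = {}
--     for key, block in segments(lines):
--         merged[key] = merged.get(key, []) + block
--
--     result = {}
--     for key, block in merged.items():
--         text = "\n".join(block).strip()
--         if text:
--             result[key] = text
--     return result
-- ===== Notes on version B (the rewrite author's own statement) =====
-- stated objective: alternative
-- what changed: A fills a dict line-by-line with a mutable current-key state; B first segments the text into (normalized label, block-of-lines) pieces by recursive descent splitting at label lines (content before the first label keyed 'main_query'), then folds the segments into an ordered dict so duplicate labels merge in first-appearance order, joining and dropping empty blocks last.
import Mathlib
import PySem

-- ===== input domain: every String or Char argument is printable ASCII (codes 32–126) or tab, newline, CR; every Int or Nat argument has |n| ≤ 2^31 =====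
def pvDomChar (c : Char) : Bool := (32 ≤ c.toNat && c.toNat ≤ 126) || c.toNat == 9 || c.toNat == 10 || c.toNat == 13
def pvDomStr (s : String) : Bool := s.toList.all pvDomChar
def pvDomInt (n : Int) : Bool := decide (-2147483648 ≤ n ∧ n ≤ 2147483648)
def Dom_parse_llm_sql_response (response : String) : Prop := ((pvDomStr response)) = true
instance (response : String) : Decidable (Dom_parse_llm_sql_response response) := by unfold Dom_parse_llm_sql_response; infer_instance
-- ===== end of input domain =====

-- B re-implements A by segmenting the text at label lines first and then merging the
-- segments (objective: alternative decomposition, same cost); return values proved equal.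

-- normalize_label, used verbatim by both Pythons:
-- label_line.lstrip("- ").strip().lower().replace(" ", "_")
-- (lstrip("- ") removes leading characters from the set {'-', ' '}: ported as dropWhile, exact)
def pvNormalizeLabel (labelLine : String) : String :=
  let label := String.ofList (labelLine.toList.dropWhile (fun c => c == '-' || c == ' '))
  PySem.Str.replace (PySem.Str.lower (PySem.Str.strip label)) " " "_"

-- line.strip().startswith("--"), the label test both Pythons use
def pvIsLabel (line : String) : Bool := PySem.Str.startswith (PySem.Str.strip line) "--"

-- ===== PORT A =====
def parse_llm_sql_response (response : String) : List (String × String) :=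
  let lines := PySem.Str.splitlines response
  -- for line in lines: stateful loop over (queries, current_key)
  let st := lines.foldl
    (fun (st : PySem.Dict String (List String) × Option String) line =>
      let queries := st.1
      let stripped := PySem.Str.strip line
      if PySem.Str.startswith stripped "--" then
        let key := pvNormalizeLabel stripped
        let queries := if queries.contains key then queries else queries.insert key []
        (queries, some key)
      else
        match st.2 with
        | none =>
          -- current_key = "main_query"; ensure key; queries[key].append(line)
          let queries := if queries.contains "main_query" then queries
                         else queries.insert "main_query" []
          (queries.modify "main_query" [] (fun ls => ls ++ [line]), some "main_query")
        | some ck =>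
          -- queries[ck].append(line)  (ck is always a present key when set)
          (queries.modify ck [] (fun ls => ls ++ [line]), some ck))
    (PySem.Dict.empty, none)
  -- join lines into SQL strings and strip empty ones
  let sql_queries := st.1.items.foldl
    (fun (d : PySem.Dict String String) kv =>
      let sql_text := PySem.Str.strip (PySem.Str.join "\n" kv.2)
      if sql_text == "" then d else d.insert kv.1 sql_text)
    PySem.Dict.empty
  sql_queries.items

-- ===== PORT B =====
-- segments(ls): recursive descent splitting at label lines;
-- split_at_label(ls) = ls.span (not a label)  (leading non-label block, remainder)
def pvSegments (lines : List String) : List (String × List String) :=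
  match lines with
  | [] => []
  | l :: rest =>
    if h : pvIsLabel l then
      let s := rest.span (fun x => !pvIsLabel x)
      (pvNormalizeLabel (PySem.Str.strip l), s.1) :: pvSegments s.2
    else
      let s := (l :: rest).span (fun x => !pvIsLabel x)
      ("main_query", s.1) :: pvSegments s.2
  termination_by lines.length
  decreasing_by
  · simp only [List.span_eq_takeWhile_dropWhile, List.length_cons]
    have := List.length_dropWhile_le (fun x => !pvIsLabel x) rest
    omega
  · simp only [List.span_eq_takeWhile_dropWhile, List.dropWhile_cons, h, Bool.not_false,
      if_true, List.length_cons]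
    have := List.length_dropWhile_le (fun x => !pvIsLabel x) rest
    omega

def parse_llm_sql_response_alt (response : String) : List (String × String) :=
  let lines := PySem.Str.splitlines response
  -- merged[key] = merged.get(key, []) + block
  let merged := (pvSegments lines).foldl
    (fun (d : PySem.Dict String (List String)) kb => d.modify kb.1 [] (fun ls => ls ++ kb.2))
    PySem.Dict.empty
  -- join lines into SQL strings and strip empty ones
  let result := merged.items.foldl
    (fun (d : PySem.Dict String String) kv =>
      let text := PySem.Str.strip (PySem.Str.join "\n" kv.2)
      if text == "" then d else d.insert kv.1 text)
    PySem.Dict.empty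
  result.items

-- ===== PRECONDITION & SPEC =====
def Spec_parse_llm_sql_response (response : String) (out : List (String × String)) : Prop := out = parse_llm_sql_response_alt response
instance (response : String) (out : List (String × String)) : Decidable (Spec_parse_llm_sql_response response out) := by unfold Spec_parse_llm_sql_response; infer_instance

-- ===== CLAIM (what is proved, stated in full; the proofs are below) =====
def Claim_equal_parse_llm_sql_response : Prop := ∀ (response : String), Dom_parse_llm_sql_response response → Spec_parse_llm_sql_response response (parse_llm_sql_response response)

-- ===== LEMMAS AND PROOFS =====

-- B's merge step
-- B's merge step
def pvMS (d : PySem.Dict String (List String)) (kb : String × List String) :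
    PySem.Dict String (List String) := d.modify kb.1 [] (fun ls => ls ++ kb.2)

-- per-line segment view of A's loop: a label line contributes (key, []),
-- a content line contributes (current key, [line])
def pvSegsLine (cur : Option String) : List String → List (String × List String)
  | [] => []
  | l :: rest =>
    if pvIsLabel l then
      (pvNormalizeLabel (PySem.Str.strip l), []) ::
        pvSegsLine (some (pvNormalizeLabel (PySem.Str.strip l))) rest
    else
      (cur.getD "main_query", [l]) :: pvSegsLine (some (cur.getD "main_query")) rest

theorem pv_map_id_of (ν : Type) (k : String) (w : ν) (its : List (String × ν))
    (h : ∀ p ∈ its, (p.1 == k) = false) :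
    List.map (fun p => if (p.1 == k) = true then (k, w) else p) its = its := by
  induction its with
  | nil => rfl
  | cons p rest ih =>
    simp only [List.map_cons, h p (List.mem_cons_self), Bool.false_eq_true, if_false]
    rw [ih (fun q hq => h q (List.mem_cons_of_mem _ hq))]

theorem pv_insert_insert_self {ν : Type} (d : PySem.Dict String ν) (k : String) (v w : ν) :
    (d.insert k v).insert k w = d.insert k w := by
  apply PySem.Dict.ext
  by_cases hc : d.contains k = true
  · rw [PySem.Dict.items_insert_of_contains _ w (PySem.Dict.contains_insert_self d k v),
        PySem.Dict.items_insert_of_contains _ v hc,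
        PySem.Dict.items_insert_of_contains _ w hc, List.map_map]
    apply List.map_congr_left
    intro p _
    by_cases hp : (p.1 == k) = true <;> simp [Function.comp, hp]
  · rw [PySem.Dict.items_insert_of_contains _ w (PySem.Dict.contains_insert_self d k v),
        PySem.Dict.items_insert_of_not_contains _ v (by simp [hc]),
        PySem.Dict.items_insert_of_not_contains _ w (by simp [hc]), List.map_append]
    have hall : ∀ p ∈ d.items, (p.1 == k) = false := by
      intro p hp
      by_contra hne
      exact hc (List.any_eq_true.mpr ⟨p, hp, by simpa using hne⟩)
    simp only [List.map_cons, List.map_nil, beq_self_eq_true, if_true]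
    rw [pv_map_id_of _ _ _ _ hall]

theorem pv_insert_getD_self (d : PySem.Dict String (List String)) (k : String)
    (hnd : d.keys.Nodup) (hc : d.contains k = true) :
    d.insert k (d.getD k []) = d := by
  apply PySem.Dict.ext
  rw [PySem.Dict.items_insert_of_contains _ _ hc]
  obtain ⟨its⟩ := d
  simp only [PySem.Dict.keys, PySem.Dict.items] at *
  induction its with
  | nil => simp [PySem.Dict.contains] at hc
  | cons p rest ih =>
    simp only [List.map_cons, List.nodup_cons] at hnd
    by_cases hp : (p.1 == k) = true
    · have hk : p.1 = k := by simpa using hp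
      have hgd : (PySem.Dict.mk (p :: rest)).getD k [] = p.2 := by
        simp [PySem.Dict.getD, PySem.Dict.get?, List.find?, hp]
      rw [hgd]
      simp only [List.map_cons, hp, if_true]
      have hrest : ∀ q ∈ rest, (q.1 == k) = false := by
        intro q hq
        by_contra hne
        have hqk : q.1 = k := by simpa using hne
        exact hnd.1 (by rw [hk, ← hqk]; exact List.mem_map_of_mem hq)
      rw [pv_map_id_of _ _ _ _ hrest, ← hk]
    · have hgd : (PySem.Dict.mk (p :: rest)).getD k [] = (PySem.Dict.mk rest).getD k [] := by
        simp [PySem.Dict.getD, PySem.Dict.get?, List.find?, hp]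
      have hc' : (PySem.Dict.mk rest).contains k = true := by
        simp only [PySem.Dict.contains, PySem.Dict.items, List.any_cons, hp, Bool.false_or] at hc ⊢
        exact hc
      simp only [List.map_cons, hp, Bool.false_eq_true, if_false, hgd]
      rw [ih hnd.2 hc']

theorem pv_ms_ms_append (d : PySem.Dict String (List String)) (k : String) (b1 b2 : List String) :
    pvMS (pvMS d (k, b1)) (k, b2) = pvMS d (k, b1 ++ b2) := by
  simp only [pvMS, PySem.Dict.modify]
  rw [PySem.Dict.getD_insert_self, pv_insert_insert_self, List.append_assoc]

theorem pv_ensure_modify (d : PySem.Dict String (List String)) (k : String) (b : List String) :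
    pvMS (if d.contains k then d else d.insert k []) (k, b) = pvMS d (k, b) := by
  by_cases hc : d.contains k = true
  · simp [hc]
  · simp only [hc, Bool.false_eq_true, if_false, pvMS, PySem.Dict.modify]
    rw [PySem.Dict.getD_insert_self, pv_insert_insert_self,
        PySem.Dict.getD_of_not_contains _ _ (by simp [hc]), List.nil_append]

theorem pv_ensure_eq_ms_nil (d : PySem.Dict String (List String)) (k : String)
    (hnd : d.keys.Nodup) :
    (if d.contains k then d else d.insert k []) = pvMS d (k, []) := by
  by_cases hc : d.contains k = true
  · simp only [hc, if_true, pvMS, PySem.Dict.modify, List.append_nil]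
    rw [pv_insert_getD_self d k hnd hc]
  · simp only [hc, Bool.false_eq_true, if_false, pvMS, PySem.Dict.modify, List.append_nil]
    rw [PySem.Dict.getD_of_not_contains _ _ (by simp [hc])]

theorem pv_nodup_ms (d : PySem.Dict String (List String)) (kb : String × List String)
    (hnd : d.keys.Nodup) : (pvMS d kb).keys.Nodup := by
  simp only [pvMS, PySem.Dict.modify]
  exact PySem.Dict.nodup_keys_insert _ _ _ hnd

theorem pv_aloop_eq_segsLine (lines : List String) (d : PySem.Dict String (List String))
    (cur : Option String) (hnd : d.keys.Nodup) :
    (lines.foldl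
      (fun (st : PySem.Dict String (List String) × Option String) line =>
        let queries := st.1
        let stripped := PySem.Str.strip line
        if PySem.Str.startswith stripped "--" then
          let key := pvNormalizeLabel stripped
          let queries := if queries.contains key then queries else queries.insert key []
          (queries, some key)
        else
          match st.2 with
          | none =>
            let queries := if queries.contains "main_query" then queries
                           else queries.insert "main_query" []
            (queries.modify "main_query" [] (fun ls => ls ++ [line]), some "main_query")
          | some ck =>
            (queries.modify ck [] (fun ls => ls ++ [line]), some ck))
      (d, cur)).1
    = (pvSegsLine cur lines).foldl pvMS d := by
  induction lines generalizing d cur with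
  | nil => rfl
  | cons l rest ih =>
    simp only [List.foldl_cons]
    by_cases hl : pvIsLabel l
    · have hl' : PySem.Str.startswith (PySem.Str.strip l) "--" = true := hl
      simp only [hl', if_true, pvSegsLine, hl, List.foldl_cons]
      rw [ih _ _ (by
        by_cases hc : d.contains (pvNormalizeLabel (PySem.Str.strip l)) = true
        · simpa [hc] using hnd
        · simp only [hc, Bool.false_eq_true, if_false]
          exact PySem.Dict.nodup_keys_insert _ _ _ hnd),
        pv_ensure_eq_ms_nil _ _ hnd]
    · have hl' : PySem.Str.startswith (PySem.Str.strip l) "--" = false := by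
        simpa [pvIsLabel] using hl
      simp only [hl', Bool.false_eq_true, if_false, pvSegsLine, hl, List.foldl_cons]
      cases cur with
      | none =>
        simp only [Option.getD_none]
        rw [ih ((if d.contains "main_query" = true then d
                 else d.insert "main_query" []).modify "main_query" [] (fun ls => ls ++ [l]))
              (some "main_query")
              (pv_nodup_ms _ ("main_query", [l]) (by
                by_cases hc : d.contains "main_query" = true
                · simpa [hc] using hnd
                · simp only [hc, Bool.false_eq_true, if_false]
                  exact PySem.Dict.nodup_keys_insert _ _ _ hnd))]
        have := pv_ensure_modify d "main_query" [l]
        simp only [pvMS] at this ⊢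
        rw [this]
      | some ck =>
        simp only [Option.getD_some]
        rw [ih (d.modify ck [] (fun ls => ls ++ [l])) (some ck)
              (pv_nodup_ms d (ck, [l]) hnd)]
        rfl

theorem pv_segsLine_append (block xs : List String) (k : String)
    (hb : ∀ l ∈ block, pvIsLabel l = false) :
    pvSegsLine (some k) (block ++ xs)
      = block.map (fun l => (k, [l])) ++ pvSegsLine (some k) xs := by
  induction block with
  | nil => rfl
  | cons l bl ih =>
    simp only [List.cons_append, pvSegsLine, hb l (List.mem_cons_self), Bool.false_eq_true,
      if_false, Option.getD_some, List.map_cons, List.cons_append]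
    rw [ih (fun q hq => hb q (List.mem_cons_of_mem _ hq))]

theorem pv_foldl_singletons (block : List String) (d : PySem.Dict String (List String))
    (k : String) (b0 : List String) :
    (block.map (fun l => (k, [l]))).foldl pvMS (pvMS d (k, b0)) = pvMS d (k, b0 ++ block) := by
  induction block generalizing b0 with
  | nil => simp
  | cons l bl ih =>
    simp only [List.map_cons, List.foldl_cons]
    rw [pv_ms_ms_append, ih (b0 ++ [l])]
    simp

theorem pv_segsLine_eq_segments (lines : List String) (d : PySem.Dict String (List String))
    (cur : Option String)
    (hhead : ∀ l, lines.head? = some l → pvIsLabel l = false → cur = none) :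
    (pvSegsLine cur lines).foldl pvMS d = (pvSegments lines).foldl pvMS d := by
  induction lines using pvSegments.induct generalizing d cur with
  | case1 =>
    rw [pvSegments.eq_def]
    rfl
  | case2 l rest h s ih =>
    have hs2 : s.2 = rest.dropWhile (fun x => !pvIsLabel x) := by
      simp [s, List.span_eq_takeWhile_dropWhile]
    rw [hs2] at ih
    have hseg : pvSegments (l :: rest)
        = (pvNormalizeLabel (PySem.Str.strip l),
            rest.takeWhile (fun x => !pvIsLabel x)) ::
          pvSegments (rest.dropWhile (fun x => !pvIsLabel x)) := by
      rw [pvSegments.eq_def]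
      simp [h, List.span_eq_takeWhile_dropWhile]
    have htw : ∀ x ∈ rest.takeWhile (fun x => !pvIsLabel x), pvIsLabel x = false := by
      intro x hx
      simpa using List.mem_takeWhile_imp hx
    have e1 : pvSegsLine cur (l :: rest)
        = (pvNormalizeLabel (PySem.Str.strip l), ([] : List String)) ::
          ((rest.takeWhile (fun x => !pvIsLabel x)).map
              (fun x => (pvNormalizeLabel (PySem.Str.strip l), [x])) ++
            pvSegsLine (some (pvNormalizeLabel (PySem.Str.strip l)))
              (rest.dropWhile (fun x => !pvIsLabel x))) := by
      conv_lhs => rw [pvSegsLine]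
      simp only [h, if_true]
      conv_lhs =>
        rw [show rest = rest.takeWhile (fun x => !pvIsLabel x)
              ++ rest.dropWhile (fun x => !pvIsLabel x)
            from List.takeWhile_append_dropWhile.symm]
      rw [pv_segsLine_append _ _ _ htw]
    rw [e1, hseg]
    simp only [List.foldl_cons, List.foldl_append]
    rw [pv_foldl_singletons]
    rw [ih (pvMS d (pvNormalizeLabel (PySem.Str.strip l),
          [] ++ rest.takeWhile (fun x => !pvIsLabel x)))
        (some (pvNormalizeLabel (PySem.Str.strip l)))
        (by
          intro x hx hlx
          exfalso
          have hne : rest.dropWhile (fun x => !pvIsLabel x) ≠ [] := by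
            intro hnil; simp [hnil] at hx
          have h2 := List.head_dropWhile_not (fun x => !pvIsLabel x) hne
          rw [List.head?_eq_some_head hne] at hx
          simp_all)]
    simp
  | case3 l rest h s ih =>
    have hs2 : s.2 = rest.dropWhile (fun x => !pvIsLabel x) := by
      simp [s, List.span_eq_takeWhile_dropWhile, List.dropWhile_cons, h]
    rw [hs2] at ih
    have hcur : cur = none := hhead l rfl (by simpa using h)
    have hspan : List.span (fun x => !pvIsLabel x) (l :: rest)
        = (l :: rest.takeWhile (fun x => !pvIsLabel x),
           rest.dropWhile (fun x => !pvIsLabel x)) := by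
      simp [List.span_eq_takeWhile_dropWhile, List.takeWhile_cons, List.dropWhile_cons, h]
    have hseg : pvSegments (l :: rest)
        = ("main_query", l :: rest.takeWhile (fun x => !pvIsLabel x)) ::
          pvSegments (rest.dropWhile (fun x => !pvIsLabel x)) := by
      rw [pvSegments.eq_def]
      simp [h, hspan]
    have htw : ∀ x ∈ rest.takeWhile (fun x => !pvIsLabel x), pvIsLabel x = false := by
      intro x hx
      simpa using List.mem_takeWhile_imp hx
    have e1 : pvSegsLine cur (l :: rest)
        = ("main_query", [l]) ::
          ((rest.takeWhile (fun x => !pvIsLabel x)).map (fun x => ("main_query", [x])) ++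
            pvSegsLine (some "main_query") (rest.dropWhile (fun x => !pvIsLabel x))) := by
      conv_lhs => rw [hcur, pvSegsLine]
      simp only [h, Bool.false_eq_true, if_false, Option.getD_none]
      conv_lhs =>
        rw [show rest = rest.takeWhile (fun x => !pvIsLabel x)
              ++ rest.dropWhile (fun x => !pvIsLabel x)
            from List.takeWhile_append_dropWhile.symm]
      rw [pv_segsLine_append _ _ _ htw]
    rw [e1, hseg]
    simp only [List.foldl_cons, List.foldl_append]
    rw [pv_foldl_singletons]
    rw [ih (pvMS d ("main_query", [l] ++ rest.takeWhile (fun x => !pvIsLabel x)))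
        (some "main_query")
        (by
          intro x hx hlx
          exfalso
          have hne : rest.dropWhile (fun x => !pvIsLabel x) ≠ [] := by
            intro hnil; simp [hnil] at hx
          have h2 := List.head_dropWhile_not (fun x => !pvIsLabel x) hne
          rw [List.head?_eq_some_head hne] at hx
          simp_all)]
    simp

-- ===== VERDICT (by name: the statement is the Claim_ definition above) =====
theorem parse_llm_sql_response_spec : Claim_equal_parse_llm_sql_response := by
  intro response _
  show parse_llm_sql_response response = parse_llm_sql_response_alt response
  simp only [parse_llm_sql_response, parse_llm_sql_response_alt]
  rw [pv_aloop_eq_segsLine (PySem.Str.splitlines response) PySem.Dict.empty none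
        (by simp [PySem.Dict.keys, PySem.Dict.empty]),
      pv_segsLine_eq_segments (PySem.Str.splitlines response) PySem.Dict.empty none
        (by intro x hx hlx; rfl)]
  rfl
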